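-- pv_equiv track=rewrite | github.com/scloew/AdventCode_2020 | solutions.py | day_10b_helper
-- ===== SOURCE A (Python) =====
-- def day_10b_helper(graph, v, map_=None):
--     map_ = {} if map_ is None else map_
--     if v in map_:
--         return map_[v]
--     elif graph[v]:
--         map_[v] = sum(day_10b_helper(graph, x, map_) for x in graph[v])
--         return map_[v]
--     else:
--         return 1
-- ===== SOURCE B (Python) =====
-- # Iterative bottom-up relaxation instead of A's recursive memoized DFS.
-- # Return-value equivalence only: A mutates map_ in place, B does not.
-- def day_10b_helper(graph, v, map_=None):
--     memo = dict(map_) if map_ is not None else {}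
--     if v in memo:
--         return memo[v]
--     if not graph[v]:
--         return 1
--     val = dict(memo)
--     for _ in range(len(graph) + 1):
--         if v in val:
--             break
--         for u, succ in graph.items():
--             if u in val or not succ:
--                 continue
--             total = 0
--             for x in succ:
--                 if x in val:
--                     total += val[x]
--                 elif x in graph and not graph[x]:
--                     total += 1
--                 else:
--                     total = None
--                     break
--             if total is not None:
--                 val[u] = total
--     return val[v]
-- ===== Notes on version B (the rewrite author's own statement) =====
-- stated objective: alternative
-- what changed: replaces A's recursive memoized depth-first traversal (which writes partial sums into the shared map_) by an iterative bottom-up relaxation: up to n+1 sweeps over the node list resolve every node whose successors are all already resolved or terminal, then the start node's count is read off; B also leaves map_ unmutated.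
import Mathlib
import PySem

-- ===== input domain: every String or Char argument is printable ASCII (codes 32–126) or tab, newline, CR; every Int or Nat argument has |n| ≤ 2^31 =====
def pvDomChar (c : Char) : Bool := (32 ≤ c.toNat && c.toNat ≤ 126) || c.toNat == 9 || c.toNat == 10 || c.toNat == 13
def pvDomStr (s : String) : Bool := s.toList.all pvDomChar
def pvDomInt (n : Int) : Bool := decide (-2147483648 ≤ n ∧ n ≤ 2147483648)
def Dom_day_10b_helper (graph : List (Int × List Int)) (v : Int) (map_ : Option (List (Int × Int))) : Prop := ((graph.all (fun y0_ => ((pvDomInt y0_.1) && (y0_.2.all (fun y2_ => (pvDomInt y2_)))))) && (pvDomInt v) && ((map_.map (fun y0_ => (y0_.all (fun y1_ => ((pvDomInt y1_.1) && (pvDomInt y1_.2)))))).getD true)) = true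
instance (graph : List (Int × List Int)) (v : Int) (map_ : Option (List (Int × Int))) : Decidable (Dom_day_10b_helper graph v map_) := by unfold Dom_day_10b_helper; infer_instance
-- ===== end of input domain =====

-- B replaces A's recursive memoized DFS by an iterative bottom-up relaxation (alternative
-- decomposition, similar cost).  Return-value equivalence only: Python A mutates map_ in
-- place (it stores computed non-terminal counts), B does not mutate its arguments.

-- shared dict helpers: first-match lookup / overwrite-or-append store on assoc lists
def pvGetA {α : Type} (l : List (Int × α)) (k : Int) : Option α :=
  match l with
  | [] => none
  | (k', x) :: t => if k' = k then some x else pvGetA t k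

def pvSetA (l : List (Int × Int)) (k : Int) (x : Int) : List (Int × Int) :=
  match l with
  | [] => [(k, x)]
  | (k', y) :: t => if k' = k then (k, x) :: t else (k', y) :: pvSetA t k x

-- ===== PORT A =====
-- fuel only makes the recursion total; on every input admitted by Pre_ it never runs out
def goA (g : List (Int × List Int)) : Nat → Int → List (Int × Int) → Option (Int × List (Int × Int))
  | 0, _, _ => none
  | f + 1, v, m =>
    match pvGetA m v with
    | some x => some (x, m)
    | none =>
      match pvGetA g v with
      | none => none               -- KeyError graph[v]
      | some succ =>
        if succ.isEmpty then some (1, m)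
        else
          match succ.foldl (fun acc x =>
              match acc with
              | none => none
              | some (s, m1) =>
                match goA g f x m1 with
                | none => none
                | some (r, m2) => some (s + r, m2)) (some ((0 : Int), m)) with
          | none => none
          | some (s, m1) => some (s, pvSetA m1 v s)

def day_10b_helper (graph : List (Int × List Int)) (v : Int) (map_ : Option (List (Int × Int))) : Int :=
  let m0 := match map_ with | none => [] | some m => m
  match goA graph (graph.length + 2) v m0 with
  | some (r, _) => r
  | none => 0

-- ===== PORT B =====
-- inner 'for x in succ' loop of Source B (total accumulator, break = none)
def sumCell (g : List (Int × List Int)) (val : List (Int × Int)) (acc : Option Int) (x : Int) : Option Int :=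
  match acc with
  | none => none
  | some s =>
    match pvGetA val x with
    | some w => some (s + w)
    | none =>
      match pvGetA g x with
      | some l => if l.isEmpty then some (s + 1) else none
      | none => none

def sumSucc (g : List (Int × List Int)) (val : List (Int × Int)) (succ : List Int) : Option Int :=
  succ.foldl (sumCell g val) (some (0 : Int))

-- one 'for u, succ in graph.items()' sweep of Source B
def roundCell (g : List (Int × List Int)) (val : List (Int × Int)) (p : Int × List Int) : List (Int × Int) :=
  if (pvGetA val p.1).isSome ∨ p.2.isEmpty then val
  else
    match sumSucc g val p.2 with
    | some t => pvSetA val p.1 t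
    | none => val

def roundStep (g : List (Int × List Int)) (val : List (Int × Int)) : List (Int × Int) :=
  g.foldl (roundCell g) val

-- the outer 'for _ in range(len(graph)+1)' loop with its early break on v
def sweepB (g : List (Int × List Int)) (v : Int) : Nat → List (Int × Int) → List (Int × Int)
  | 0, val => val
  | r + 1, val => if (pvGetA val v).isSome then val else sweepB g v r (roundStep g val)

def day_10b_helper_alt (graph : List (Int × List Int)) (v : Int) (map_ : Option (List (Int × Int))) : Int :=
  let memo := match map_ with | none => [] | some m => m
  match pvGetA memo v with
  | some x => x
  | none =>
    match pvGetA graph v with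
    | none => 0                    -- KeyError graph[v]
    | some succ =>
      if succ.isEmpty then 1
      else
        let val := sweepB graph v (graph.length + 1) memo
        (pvGetA val v).getD 0      -- KeyError val[v] outside Pre_

-- ===== PRECONDITION & SPEC =====
-- one expansion step of the reachability relation used below:
-- from the set S, follow the successor lists of non-memoised nodes of S
def stepFP (g : List (Int × List Int)) (mk : List Int) (S : List Int) : List Int :=
  (g.filter (fun p => decide (p.1 ∈ S) && !decide (p.1 ∈ mk))).flatMap Prod.snd

-- the set of nodes reachable from v through non-memoised nodes (cumulative expansion;
-- g.length rounds saturate it, since a shortest expansion path is simple)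
def reachC (g : List (Int × List Int)) (mk : List Int) (v : Int) : List Int :=
  (fun S => S ++ stepFP g mk S)^[g.length] [v]

-- Pre_ excludes exactly (a) the inputs on which A raises — a node reachable from v whose
-- key is missing from the dict (KeyError) or a cycle reachable from v (infinite
-- recursion) — plus association lists with duplicate graph/memo keys, which cannot
-- arise from a Python dict and are ambiguous as one (first- vs last-match).  Defects in
-- parts of the graph unreachable from v are admitted.
def Pre_day_10b_helper (graph : List (Int × List Int)) (v : Int) (map_ : Option (List (Int × Int))) : Prop :=
  (graph.map Prod.fst).Nodup ∧ ((map_.getD []).map Prod.fst).Nodup ∧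
  (v ∈ (map_.getD []).map Prod.fst ∨ (v, ([] : List Int)) ∈ graph ∨
    (v ∈ graph.map Prod.fst ∧
     (∀ p ∈ graph, p.1 ∈ reachC graph ((map_.getD []).map Prod.fst) v →
        p.1 ∉ (map_.getD []).map Prod.fst →
        ∀ x ∈ p.2, x ∈ graph.map Prod.fst ∨ x ∈ (map_.getD []).map Prod.fst) ∧
     (∀ u ∈ reachC graph ((map_.getD []).map Prod.fst) v, ∀ k < graph.length + 2, 1 ≤ k →
        u ∉ (stepFP graph ((map_.getD []).map Prod.fst))^[k] [u])))

instance (graph : List (Int × List Int)) (v : Int) (map_ : Option (List (Int × Int))) : Decidable (Pre_day_10b_helper graph v map_) := by unfold Pre_day_10b_helper; infer_instance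

def pvWitness_day_10b_helper : (List (Int × List Int)) × Int × (Option (List (Int × Int))) :=
  ([(0, [1, 2]), (1, [2]), (2, [])], 0, some [(3, 5)])

def Spec_day_10b_helper (graph : List (Int × List Int)) (v : Int) (map_ : Option (List (Int × Int))) (out : Int) : Prop := out = day_10b_helper_alt graph v map_
instance (graph : List (Int × List Int)) (v : Int) (map_ : Option (List (Int × Int))) (out : Int) : Decidable (Spec_day_10b_helper graph v map_ out) := by unfold Spec_day_10b_helper; infer_instance

-- ===== CLAIM (what is proved, stated in full; the proofs are below) =====
def Claim_equal_day_10b_helper : Prop := ∀ (graph : List (Int × List Int)) (v : Int) (map_ : Option (List (Int × Int))), Dom_day_10b_helper graph v map_ → Pre_day_10b_helper graph v map_ → Spec_day_10b_helper graph v map_ (day_10b_helper graph v map_)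

-- ===== LEMMAS AND PROOFS =====

theorem pv_witness_ok :
    Dom_day_10b_helper pvWitness_day_10b_helper.1 pvWitness_day_10b_helper.2.1 pvWitness_day_10b_helper.2.2 ∧
    Pre_day_10b_helper pvWitness_day_10b_helper.1 pvWitness_day_10b_helper.2.1 pvWitness_day_10b_helper.2.2 := by
  decide

-- ---------- proof-only definitions ----------

-- successor list with memoised nodes cut, and the lookup-based expansion step
def succsOf (g : List (Int × List Int)) (mk : List Int) (u : Int) : List Int :=
  if u ∈ mk then [] else (pvGetA g u).getD []

def stepF (g : List (Int × List Int)) (mk : List Int) (S : List Int) : List Int :=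
  S.flatMap (succsOf g mk)

def cumStep (g : List (Int × List Int)) (mk : List Int) (S : List Int) : List Int :=
  S ++ stepFP g mk S

-- the canonical count value, fuel-indexed (consults the initial memo m0, never writes)
def stepO (F : Int → Option Int) (a : Option Int) (x : Int) : Option Int :=
  match a, F x with
  | some s, some r => some (s + r)
  | _, _ => none

def cnt (g : List (Int × List Int)) (m0 : List (Int × Int)) : Nat → Int → Option Int
  | 0, _ => none
  | f + 1, u =>
    match pvGetA m0 u with
    | some x => some x
    | none =>
      match pvGetA g u with
      | none => none
      | some succ => if succ.isEmpty then some 1 else succ.foldl (stepO (cnt g m0 f)) (some 0)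

def ChainG (g : List (Int × List Int)) (mk : List Int) (c : Nat → Int) (k : Nat) : Prop :=
  ∀ i < k, c (i + 1) ∈ succsOf g mk (c i)

-- "u is reachable from v": some expansion chain leads from v to u
def ReachBy (g : List (Int × List Int)) (mk : List Int) (v u : Int) : Prop :=
  ∃ k, ∃ c : Nat → Int, c 0 = v ∧ c k = u ∧ ChainG g mk c k

def CohM (g : List (Int × List Int)) (m0 m : List (Int × Int)) : Prop :=
  ∀ k x, pvGetA m k = some x → ∃ f, cnt g m0 f k = some x

def ExtK (m0 m : List (Int × Int)) : Prop :=
  ∀ k, pvGetA m0 k ≠ none → pvGetA m k ≠ none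

def Ext2 (w w' : List (Int × Int)) : Prop :=
  ∀ k y, pvGetA w k = some y → pvGetA w' k = some y

-- ---------- pvGetA / pvSetA ----------

theorem pvGetA_eq_none_iff {α : Type} (l : List (Int × α)) (k : Int) :
    pvGetA l k = none ↔ k ∉ l.map Prod.fst := by
  induction l with
  | nil => simp [pvGetA]
  | cons p t ih =>
    obtain ⟨k', x⟩ := p
    by_cases h : k' = k
    · subst h; simp [pvGetA]
    · simp only [pvGetA, if_neg h, ih, List.map_cons, List.mem_cons]
      constructor
      · intro hn hc; rcases hc with hc | hc
        · exact h hc.symm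
        · exact hn hc
      · intro hn; exact fun hc => hn (Or.inr hc)

theorem pvGetA_mem {α : Type} {l : List (Int × α)} {k : Int} {x : α}
    (h : pvGetA l k = some x) : (k, x) ∈ l := by
  induction l with
  | nil => simp [pvGetA] at h
  | cons p t ih =>
    obtain ⟨k', y⟩ := p
    by_cases hk : k' = k
    · subst hk
      simp [pvGetA] at h
      subst h
      exact List.mem_cons_self
    · simp [pvGetA, hk] at h
      exact List.mem_cons_of_mem _ (ih h)

theorem pvGetA_of_mem_nodup {α : Type} {l : List (Int × α)} {k : Int} {x : α}
    (nd : (l.map Prod.fst).Nodup) (h : (k, x) ∈ l) : pvGetA l k = some x := by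
  induction l with
  | nil => simp at h
  | cons p t ih =>
    obtain ⟨k', y⟩ := p
    rw [List.map_cons] at nd
    have h1' := List.nodup_cons.1 nd
    rcases List.mem_cons.1 h with h1 | h1
    · cases h1; simp [pvGetA]
    · have hk : k' ≠ k := by
        intro he
        have hmem : k ∈ t.map Prod.fst := List.mem_map.2 ⟨(k, x), h1, rfl⟩
        exact h1'.1 (by rw [he]; exact hmem)
      simp [pvGetA, hk]
      exact ih h1'.2 h1

theorem pvGetA_set_self (m : List (Int × Int)) (k : Int) (x : Int) :
    pvGetA (pvSetA m k x) k = some x := by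
  induction m with
  | nil => simp [pvSetA, pvGetA]
  | cons p t ih =>
    obtain ⟨k', y⟩ := p
    by_cases h : k' = k <;> simp [pvSetA, h, pvGetA, ih]

theorem pvGetA_set_ne (m : List (Int × Int)) {k k' : Int} (x : Int) (h : k' ≠ k) :
    pvGetA (pvSetA m k x) k' = pvGetA m k' := by
  induction m with
  | nil =>
    have hne : k ≠ k' := fun he => h he.symm
    simp [pvSetA, pvGetA, hne]
  | cons p t ih =>
    obtain ⟨k0, y⟩ := p
    by_cases h0 : k0 = k
    · subst h0
      have hne : k0 ≠ k' := fun he => h he.symm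
      simp [pvSetA, pvGetA, hne]
    · simp [pvSetA, h0, pvGetA, ih]

-- ---------- stepO folds ----------

theorem foldO_none (F : Int → Option Int) (l : List Int) :
    l.foldl (stepO F) none = none := by
  induction l with
  | nil => rfl
  | cons x t ih => simpa [stepO] using ih

theorem foldO_congr (F G : Int → Option Int) (l : List Int)
    (h : ∀ x ∈ l, ∀ y, F x = some y → G x = some y) :
    ∀ s t : Int, l.foldl (stepO F) (some s) = some t → l.foldl (stepO G) (some s) = some t := by
  induction l with
  | nil => intro s t ht; exact ht
  | cons x r ih =>
    intro s t ht
    cases hx : F x with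
    | none => simp [List.foldl, stepO, hx, foldO_none] at ht
    | some w =>
      have hg := h x (by simp) w hx
      simp only [List.foldl, stepO, hx] at ht
      simp only [List.foldl, stepO, hg]
      exact ih (fun y hy => h y (by simp [hy])) _ _ ht

theorem foldO_some (F : Int → Option Int) (l : List Int)
    (h : ∀ x ∈ l, ∃ r, F x = some r) :
    ∀ s : Int, ∃ t, l.foldl (stepO F) (some s) = some t := by
  induction l with
  | nil => intro s; exact ⟨s, rfl⟩
  | cons x r ih =>
    intro s
    obtain ⟨w, hw⟩ := h x (by simp)
    simp only [List.foldl, stepO, hw]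
    exact ih (fun y hy => h y (by simp [hy])) _

theorem foldO_forall_some (F : Int → Option Int) (l : List Int) :
    ∀ s t : Int, l.foldl (stepO F) (some s) = some t → ∀ x ∈ l, ∃ w, F x = some w := by
  induction l with
  | nil => simp
  | cons x r ih =>
    intro s t ht y hy
    cases hx : F x with
    | none => simp [List.foldl, stepO, hx, foldO_none] at ht
    | some w =>
      simp only [List.foldl, stepO, hx] at ht
      rcases List.mem_cons.1 hy with h1 | h1
      · exact ⟨w, h1 ▸ hx⟩
      · exact ih _ _ ht y h1

-- ---------- cnt: monotone in fuel, unique value ----------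

theorem cnt_succ (g : List (Int × List Int)) (m0 : List (Int × Int)) :
    ∀ f u x, cnt g m0 f u = some x → cnt g m0 (f + 1) u = some x := by
  intro f
  induction f with
  | zero => intro u x h; simp [cnt] at h
  | succ f ih =>
    intro u x h
    simp only [cnt] at h ⊢
    cases hm : pvGetA m0 u with
    | some y => simp only [hm] at h ⊢; exact h
    | none =>
      simp only [hm] at h ⊢
      cases hg : pvGetA g u with
      | none => simp [hg] at h
      | some succ =>
        simp only [hg] at h ⊢
        by_cases he : succ.isEmpty
        · simp only [he, if_true] at h ⊢; exact h
        · simp only [he] at h ⊢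
          exact foldO_congr _ _ succ (fun y _ w hw => ih y w hw) 0 x h

theorem cnt_mono (g : List (Int × List Int)) (m0 : List (Int × Int)) {f f' : Nat}
    (h : f ≤ f') : ∀ {u x}, cnt g m0 f u = some x → cnt g m0 f' u = some x := by
  induction h with
  | refl => intro u x h; exact h
  | step _ ih => intro u x h; exact cnt_succ g m0 _ _ _ (ih h)

theorem cnt_uniq (g : List (Int × List Int)) (m0 : List (Int × Int)) {f f' : Nat} {u x y : Int}
    (h1 : cnt g m0 f u = some x) (h2 : cnt g m0 f' u = some y) : x = y := by
  rcases le_total f f' with h | h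
  · have h3 := cnt_mono g m0 h h1
    rw [h3] at h2
    exact Option.some.inj h2
  · have h3 := cnt_mono g m0 h h2
    rw [h3] at h1
    exact (Option.some.inj h1).symm

-- ---------- chains, reachability, acyclicity ----------

theorem chainG_restrict {g : List (Int × List Int)} {mk : List Int} {c : Nat → Int} {k m : Nat}
    (hc : ChainG g mk c k) (hm : m ≤ k) : ChainG g mk c m :=
  fun i hi => hc i (lt_of_lt_of_le hi hm)

theorem chain_iterate (g : List (Int × List Int)) (mk : List Int) :
    ∀ (k : Nat) (c : Nat → Int), ChainG g mk c k → c k ∈ (stepF g mk)^[k] [c 0] := by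
  intro k
  induction k with
  | zero => intro c _; simp
  | succ k ih =>
    intro c hc
    rw [Function.iterate_succ_apply']
    have hk : c k ∈ (stepF g mk)^[k] [c 0] := ih c (chainG_restrict hc (Nat.le_succ k))
    exact List.mem_flatMap.2 ⟨c k, hk, hc k (Nat.lt_succ_self k)⟩

theorem chain_node_key {g : List (Int × List Int)} {mk : List Int} {c : Nat → Int} {k : Nat}
    (hc : ChainG g mk c k) {i : Nat} (hi : i < k) : c i ∈ g.map Prod.fst := by
  have hstep := hc i hi
  by_cases hmk : c i ∈ mk
  · simp [succsOf, hmk] at hstep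
  · simp only [succsOf, if_neg hmk] at hstep
    cases hgi : pvGetA g (c i) with
    | none => rw [hgi] at hstep; simp at hstep
    | some l =>
      by_contra hn
      rw [(pvGetA_eq_none_iff g (c i)).2 hn] at hgi
      cases hgi

theorem mem_stepFP_of_mem_stepF {g : List (Int × List Int)} {mk : List Int}
    {S S' : List Int} (hsub : ∀ y, y ∈ S → y ∈ S') {x : Int}
    (hx : x ∈ stepF g mk S) : x ∈ stepFP g mk S' := by
  obtain ⟨u, huS, hxu⟩ := List.mem_flatMap.1 hx
  by_cases hmk : u ∈ mk
  · simp [succsOf, hmk] at hxu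
  · simp only [succsOf, if_neg hmk] at hxu
    cases hgu : pvGetA g u with
    | none => rw [hgu] at hxu; simp at hxu
    | some l =>
      rw [hgu] at hxu
      simp only [Option.getD_some] at hxu
      refine List.mem_flatMap.2 ⟨(u, l), ?_, hxu⟩
      refine List.mem_filter.2 ⟨pvGetA_mem hgu, ?_⟩
      simp [hsub u huS, hmk]

theorem iterF_subset_iterFP (g : List (Int × List Int)) (mk : List Int) :
    ∀ (k : Nat) (u x : Int), x ∈ (stepF g mk)^[k] [u] → x ∈ (stepFP g mk)^[k] [u] := by
  intro k
  induction k with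
  | zero => intro u x hx; exact hx
  | succ k ih =>
    intro u x hx
    rw [Function.iterate_succ_apply'] at hx ⊢
    exact mem_stepFP_of_mem_stepF (fun y hy => ih u y hy) hx

theorem reachBy_self (g : List (Int × List Int)) (mk : List Int) (v : Int) :
    ReachBy g mk v v :=
  ⟨0, fun _ => v, rfl, rfl, fun i hi => absurd hi (Nat.not_lt_zero i)⟩

theorem reachBy_step {g : List (Int × List Int)} {mk : List Int} {v u x : Int}
    (hr : ReachBy g mk v u) (hx : x ∈ succsOf g mk u) : ReachBy g mk v x := by
  obtain ⟨k, c, hc0, hck, hch⟩ := hr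
  refine ⟨k + 1, fun i => if i ≤ k then c i else x, by simp [hc0], by simp, ?_⟩
  intro i hi
  rcases Nat.lt_succ_iff_lt_or_eq.1 hi with hik | hik
  · have h1 : i ≤ k := le_of_lt hik
    have h2 : i + 1 ≤ k := hik
    simp only [if_pos h1, if_pos h2]
    exact hch i hik
  · subst hik
    simp only [le_refl, if_pos, Nat.not_succ_le_self, hck]
    simpa [hck] using hx

theorem mem_stepFP_of_succsOf {g : List (Int × List Int)} {mk S : List Int} {u x : Int}
    (huS : u ∈ S) (hx : x ∈ succsOf g mk u) : x ∈ stepFP g mk S :=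
  mem_stepFP_of_mem_stepF (fun _ hy => hy) (List.mem_flatMap.2 ⟨u, huS, hx⟩)

theorem mem_cumStep_left {g : List (Int × List Int)} {mk : List Int} {S : List Int} {x : Int}
    (hx : x ∈ S) : x ∈ cumStep g mk S :=
  List.mem_append.2 (Or.inl hx)

theorem iterC_mono_fuel (g : List (Int × List Int)) (mk : List Int) (L : List Int) :
    ∀ {i m : Nat}, i ≤ m → ∀ x, x ∈ (cumStep g mk)^[i] L → x ∈ (cumStep g mk)^[m] L := by
  intro i m him
  induction him with
  | refl => exact fun x hx => hx
  | step _ ih =>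
    intro x hx
    rw [Function.iterate_succ_apply']
    exact mem_cumStep_left (ih x hx)

theorem chain_mem_iterC (g : List (Int × List Int)) (mk : List Int) (c : Nat → Int) (k : Nat)
    (hc : ChainG g mk c k) : ∀ i ≤ k, c i ∈ (cumStep g mk)^[i] [c 0] := by
  intro i
  induction i with
  | zero => intro _; simp
  | succ i ih =>
    intro hik
    rw [Function.iterate_succ_apply']
    have h1 : c i ∈ (cumStep g mk)^[i] [c 0] := ih (by omega)
    exact List.mem_append.2 (Or.inr (mem_stepFP_of_succsOf h1 (hc i (by omega))))

-- a shortest expansion path is simple, so g.length cumulative rounds reach everything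
theorem reach_shorten (g : List (Int × List Int)) (mk : List Int) (v : Int)
    {u : Int} (hr : ReachBy g mk v u) :
    u ∈ reachC g mk v := by
  obtain ⟨k, c, hc0, hck, hch⟩ := hr
  induction k using Nat.strong_induction_on generalizing c with
  | _ k ih =>
  set n := g.length with hn
  by_cases hkn : k ≤ n
  · have := chain_mem_iterC g mk c k hch k le_rfl
    rw [hc0] at this
    rw [hck] at this
    exact iterC_mono_fuel g mk [v] hkn u this
  · -- pigeonhole on the first n+1 nodes, splice the chain shorter
    have hkeys : ∀ i : Nat, i ≤ n → c i ∈ g.map Prod.fst := by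
      intro i hi
      rcases Nat.lt_or_ge i k with hik | hik
      · exact chain_node_key hch hik
      · omega
    have hcard : ((g.map Prod.fst).toFinset).card ≤ n :=
      le_trans (List.toFinset_card_le _) (by simp [hn])
    obtain ⟨a, _, b, _, hne, heq⟩ :=
      Finset.exists_ne_map_eq_of_card_lt_of_maps_to
        (s := (Finset.univ : Finset (Fin (n + 1)))) (t := (g.map Prod.fst).toFinset)
        (f := fun i : Fin (n + 1) => c i)
        (by simpa using Nat.lt_succ_of_le hcard)
        (fun i _ => List.mem_toFinset.2 (hkeys i (Nat.lt_succ_iff.1 i.isLt)))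
    have hsplice : ∀ (a b : Fin (n + 1)), (a : Nat) < (b : Nat) → c a = c b →
        u ∈ reachC g mk v := by
      intro a b hab habeq
      set i := (a : Nat) with hia
      set j := (b : Nat) with hjb
      have hjk : j < k := by omega
      set d := j - i with hd
      have hd1 : 1 ≤ d := by omega
      set c' : Nat → Int := fun t => if t ≤ i then c t else c (t + d) with hc'
      have hch' : ChainG g mk c' (k - d) := by
        intro t ht
        by_cases hti : t < i
        · have h1 : t ≤ i := le_of_lt hti
          have h2 : t + 1 ≤ i := hti
          simp only [hc', if_pos h1, if_pos h2]
          exact hch t (by omega)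
        · by_cases hteq : t = i
          · have h1 : t ≤ i := le_of_eq hteq
            have h2 : ¬ (t + 1 ≤ i) := by omega
            simp only [hc', if_pos h1, if_neg h2]
            have hts : t + 1 + d = j + 1 := by omega
            rw [hts, hteq, habeq]
            exact hch j hjk
          · have h1 : ¬ (t ≤ i) := by omega
            have h2 : ¬ (t + 1 ≤ i) := by omega
            simp only [hc', if_neg h1, if_neg h2]
            have : t + 1 + d = t + d + 1 := by omega
            rw [this]
            exact hch (t + d) (by omega)
      have hc'0 : c' 0 = v := by
        simp only [hc', Nat.zero_le, if_pos]
        exact hc0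
      have hc'k : c' (k - d) = u := by
        have hgt : ¬ (k - d ≤ i) := by omega
        simp only [hc', if_neg hgt]
        have : k - d + d = k := by omega
        rw [this, hck]
      exact ih (k - d) (by omega) c' hc'0 hc'k hch'
    rcases lt_or_gt_of_ne hne with hlt | hlt
    · exact hsplice a b hlt heq
    · exact hsplice b a hlt heq.symm

theorem no_long_chain (g : List (Int × List Int)) (mk : List Int) (v : Int)
    (acy : ∀ u ∈ reachC g mk v, ∀ k < g.length + 2, 1 ≤ k → u ∉ (stepFP g mk)^[k] [u]) :
    ∀ c, c 0 = v → ¬ ChainG g mk c (g.length + 1) := by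
  intro c hc0 hc
  set n := g.length with hn
  have hkeys : ∀ i : Nat, i ≤ n → c i ∈ g.map Prod.fst := fun i hi =>
    chain_node_key hc (by omega)
  have key : ∀ a b : Fin (n + 1), (a : Nat) < (b : Nat) → c a = c b → False := by
    intro a b hab heq
    set i := (a : Nat)
    set j := (b : Nat)
    have hj : j ≤ n := Nat.lt_succ_iff.1 b.isLt
    have hch2 : ChainG g mk (fun t => c (i + t)) (j - i) := by
      intro t ht
      exact hc (i + t) (by omega)
    have hmem := chain_iterate g mk (j - i) _ hch2
    simp only [Nat.add_zero] at hmem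
    have hij : i + (j - i) = j := by omega
    rw [hij] at hmem
    rw [← heq] at hmem
    have hreach : c i ∈ reachC g mk v :=
      reach_shorten g mk v ⟨i, c, hc0, rfl, chainG_restrict hc (by omega)⟩
    exact acy (c i) hreach (j - i) (by omega) (by omega)
      (iterF_subset_iterFP g mk (j - i) (c i) (c i) hmem)
  have hcard : ((g.map Prod.fst).toFinset).card ≤ n :=
    le_trans (List.toFinset_card_le _) (by simp [hn])
  obtain ⟨a, _, b, _, hne, heq⟩ :=
    Finset.exists_ne_map_eq_of_card_lt_of_maps_to
      (s := (Finset.univ : Finset (Fin (n + 1)))) (t := (g.map Prod.fst).toFinset)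
      (f := fun i : Fin (n + 1) => c i)
      (by simpa using Nat.lt_succ_of_le hcard)
      (fun i _ => List.mem_toFinset.2 (hkeys i (Nat.lt_succ_iff.1 i.isLt)))
  rcases lt_or_gt_of_ne hne with hlt | hlt
  · exact key a b hlt heq
  · exact key b a hlt heq.symm

theorem chain_bound (g : List (Int × List Int)) (mk : List Int) (v : Int)
    (acy : ∀ u ∈ reachC g mk v, ∀ k < g.length + 2, 1 ≤ k → u ∉ (stepFP g mk)^[k] [u]) :
    ∀ c k, c 0 = v → ChainG g mk c k → k ≤ g.length := by
  intro c k hc0 hc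
  by_contra hgt
  exact no_long_chain g mk v acy c hc0 (chainG_restrict hc (by omega))

-- ---------- cnt is defined on the admitted inputs ----------

theorem cnt_exists (g : List (Int × List Int)) (m0 : List (Int × Int)) (v : Int)
    (closed : ∀ p ∈ g, ReachBy g (m0.map Prod.fst) v p.1 → p.1 ∉ m0.map Prod.fst →
       ∀ x ∈ p.2, x ∈ g.map Prod.fst ∨ x ∈ m0.map Prod.fst) :
    ∀ f u, ReachBy g (m0.map Prod.fst) v u →
      (∀ c k, c 0 = u → ChainG g (m0.map Prod.fst) c k → k < f) →
      (u ∈ g.map Prod.fst ∨ u ∈ m0.map Prod.fst) → ∃ s, cnt g m0 f u = some s := by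
  intro f
  induction f with
  | zero =>
    intro u _ hch _
    exact absurd (hch (fun _ => u) 0 rfl (fun i hi => absurd hi (Nat.not_lt_zero i))) (by omega)
  | succ f ih =>
    intro u hru hch hu
    cases hm : pvGetA m0 u with
    | some x => exact ⟨x, by simp [cnt, hm]⟩
    | none =>
      have humk : u ∉ m0.map Prod.fst := (pvGetA_eq_none_iff _ _).1 hm
      have huk : u ∈ g.map Prod.fst := hu.resolve_right humk
      obtain ⟨succ, hgu⟩ : ∃ succ, pvGetA g u = some succ := by
        cases hgu : pvGetA g u with
        | none => exact absurd huk ((pvGetA_eq_none_iff g u).1 hgu)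
        | some l => exact ⟨l, rfl⟩
      by_cases he : succ.isEmpty
      · exact ⟨1, by simp [cnt, hm, hgu, he]⟩
      · have hx : ∀ x ∈ succ, ∃ r, cnt g m0 f x = some r := by
          intro x hxs
          have hsx : x ∈ succsOf g (m0.map Prod.fst) u := by
            simp only [succsOf, if_neg humk, hgu, Option.getD_some]
            exact hxs
          refine ih x (reachBy_step hru hsx) ?_
            (closed (u, succ) (pvGetA_mem hgu) hru humk x hxs)
          intro c k hc0 hck
          have hch2 : ChainG g (m0.map Prod.fst) (fun i => match i with | 0 => u | i + 1 => c i) (k + 1) := by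
            intro i hi
            cases i with
            | zero => simpa [hc0] using hsx
            | succ i => exact hck i (by omega)
          have := hch _ (k + 1) rfl hch2
          omega
        obtain ⟨t, ht⟩ := foldO_some _ succ hx 0
        exact ⟨t, by simp [cnt, hm, hgu, he, ht]⟩

-- ---------- port A computes cnt ----------

theorem goA_fold (g : List (Int × List Int)) (m0 : List (Int × Int)) (f : Nat)
    (IH : ∀ m u s, CohM g m0 m → ExtK m0 m → cnt g m0 f u = some s →
      ∃ m', goA g f u m = some (s, m') ∧ CohM g m0 m' ∧ ExtK m0 m') :
    ∀ (l : List Int) (s0 : Int) (m : List (Int × Int)) (t : Int),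
      CohM g m0 m → ExtK m0 m →
      l.foldl (stepO (cnt g m0 f)) (some s0) = some t →
      ∃ m', l.foldl (fun acc x =>
          match acc with
          | none => none
          | some (s, m1) =>
            match goA g f x m1 with
            | none => none
            | some (r, m2) => some (s + r, m2)) (some (s0, m)) = some (t, m') ∧
        CohM g m0 m' ∧ ExtK m0 m' := by
  intro l
  induction l with
  | nil =>
    intro s0 m t hc he ht
    cases Option.some.inj ht
    exact ⟨m, rfl, hc, he⟩
  | cons x r ihl =>
    intro s0 m t hc he ht
    cases hx : cnt g m0 f x with
    | none => simp [stepO, hx, foldO_none] at ht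
    | some w =>
      simp only [List.foldl_cons, stepO, hx] at ht
      obtain ⟨m1, hgo, hc1, he1⟩ := IH m x w hc he hx
      obtain ⟨m', hfold, hc', he'⟩ := ihl (s0 + w) m1 t hc1 he1 ht
      refine ⟨m', ?_, hc', he'⟩
      simp only [List.foldl_cons, hgo]
      exact hfold

theorem goA_ok (g : List (Int × List Int)) (m0 : List (Int × Int)) :
    ∀ f m u s, CohM g m0 m → ExtK m0 m → cnt g m0 f u = some s →
      ∃ m', goA g f u m = some (s, m') ∧ CohM g m0 m' ∧ ExtK m0 m' := by
  intro f
  induction f with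
  | zero => intro m u s _ _ h; simp [cnt] at h
  | succ f ih =>
    intro m u s hc he hcnt
    have hcnt0 := hcnt
    cases hmu : pvGetA m u with
    | some x =>
      obtain ⟨fx, hfx⟩ := hc u x hmu
      have hxs : x = s := cnt_uniq g m0 hfx hcnt
      subst hxs
      exact ⟨m, by simp [goA, hmu], hc, he⟩
    | none =>
      have hm0u : pvGetA m0 u = none := by
        cases hm0 : pvGetA m0 u with
        | none => rfl
        | some y => exact absurd hmu (he u (by simp [hm0]))
      simp only [cnt, hm0u] at hcnt
      cases hgu : pvGetA g u with
      | none => simp [hgu] at hcnt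
      | some succ =>
        simp only [hgu] at hcnt
        by_cases hemp : succ.isEmpty
        · rw [if_pos hemp] at hcnt
          cases Option.some.inj hcnt
          exact ⟨m, by simp [goA, hmu, hgu, hemp], hc, he⟩
        · rw [if_neg hemp] at hcnt
          obtain ⟨m1, hfold, hc1, he1⟩ := goA_fold g m0 f ih succ 0 m s hc he hcnt
          refine ⟨pvSetA m1 u s, ?_, ?_, ?_⟩
          · simp only [goA, hmu, hgu, hemp, Bool.false_eq_true, if_false, hfold]
          · intro k x hk
            by_cases hku : k = u
            · subst hku
              rw [pvGetA_set_self] at hk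
              cases Option.some.inj hk
              exact ⟨f + 1, hcnt0⟩
            · rw [pvGetA_set_ne m1 s hku] at hk
              exact hc1 k x hk
          · intro k hk
            by_cases hku : k = u
            · subst hku; rw [pvGetA_set_self]; simp
            · rw [pvGetA_set_ne m1 s hku]; exact he1 k hk

-- ---------- port B: extension and invariants ----------

theorem ext2_refl (w : List (Int × Int)) : Ext2 w w := fun _ _ h => h

theorem ext2_trans {w1 w2 w3 : List (Int × Int)} (h1 : Ext2 w1 w2) (h2 : Ext2 w2 w3) :
    Ext2 w1 w3 := fun k y h => h2 k y (h1 k y h)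

theorem roundCell_ext2 (g : List (Int × List Int)) (val : List (Int × Int)) (p : Int × List Int) :
    Ext2 val (roundCell g val p) := by
  intro k y hk
  unfold roundCell
  by_cases hskip : (pvGetA val p.1).isSome ∨ p.2.isEmpty
  · rw [if_pos hskip]; exact hk
  · rw [if_neg hskip]
    push Not at hskip
    cases hs : sumSucc g val p.2 with
    | none => exact hk
    | some t =>
      have hvp : pvGetA val p.1 = none := Option.not_isSome_iff_eq_none.1 hskip.1
      have hne : k ≠ p.1 := fun he => by rw [he, hvp] at hk; cases hk
      rw [pvGetA_set_ne val t hne]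
      exact hk

theorem foldCells_ext2 (g : List (Int × List Int)) :
    ∀ (l : List (Int × List Int)) (val : List (Int × Int)),
      Ext2 val (l.foldl (roundCell g) val) := by
  intro l
  induction l with
  | nil => intro val; exact ext2_refl val
  | cons p r ih =>
    intro val
    exact ext2_trans (roundCell_ext2 g val p) (ih (roundCell g val p))

theorem roundStep_ext2 (g : List (Int × List Int)) (val : List (Int × Int)) :
    Ext2 val (roundStep g val) := foldCells_ext2 g g val

theorem iterate_ext2 (g : List (Int × List Int)) :
    ∀ (r : Nat) (val : List (Int × Int)), Ext2 val ((roundStep g)^[r] val) := by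
  intro r
  induction r with
  | zero => intro val; exact ext2_refl val
  | succ r ih =>
    intro val
    rw [Function.iterate_succ_apply]
    exact ext2_trans (roundStep_ext2 g val) (ih (roundStep g val))

theorem foldSum_none (g : List (Int × List Int)) (val : List (Int × Int)) (l : List Int) :
    l.foldl (sumCell g val) none = none := by
  induction l with
  | nil => rfl
  | cons x t ih => simpa [sumCell] using ih

theorem sum_to_cnt (g : List (Int × List Int)) (m0 val : List (Int × Int))
    (hc : CohM g m0 val) (he : ExtK m0 val) :
    ∀ (l : List Int) (s0 t : Int), l.foldl (sumCell g val) (some s0) = some t →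
      ∃ F, l.foldl (stepO (cnt g m0 F)) (some s0) = some t := by
  intro l
  induction l with
  | nil => intro s0 t ht; exact ⟨0, ht⟩
  | cons x r ih =>
    intro s0 t ht
    cases hvx : pvGetA val x with
    | some w =>
      simp only [List.foldl_cons, sumCell, hvx] at ht
      obtain ⟨F1, hF1⟩ := ih (s0 + w) t ht
      obtain ⟨fx, hfx⟩ := hc x w hvx
      refine ⟨max fx F1, ?_⟩
      simp only [List.foldl_cons, stepO, cnt_mono g m0 (le_max_left fx F1) hfx]
      exact foldO_congr _ _ r (fun y _ z hz => cnt_mono g m0 (le_max_right fx F1) hz) _ _ hF1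
    | none =>
      have hm0x : pvGetA m0 x = none := by
        cases hm0 : pvGetA m0 x with
        | none => rfl
        | some y => exact absurd hvx (he x (by simp [hm0]))
      cases hgx : pvGetA g x with
      | none => simp [List.foldl_cons, sumCell, hvx, hgx, foldSum_none] at ht
      | some lx =>
        by_cases hle : lx.isEmpty
        · simp only [List.foldl_cons, sumCell, hvx, hgx, hle, if_true] at ht
          obtain ⟨F1, hF1⟩ := ih (s0 + 1) t ht
          have hcx : cnt g m0 1 x = some 1 := by simp [cnt, hm0x, hgx, hle]
          refine ⟨max 1 F1, ?_⟩
          simp only [List.foldl_cons, stepO, cnt_mono g m0 (le_max_left 1 F1) hcx]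
          exact foldO_congr _ _ r (fun y _ z hz => cnt_mono g m0 (le_max_right 1 F1) hz) _ _ hF1
        · simp [List.foldl_cons, sumCell, hvx, hgx, hle, foldSum_none] at ht

theorem roundCell_inv (g : List (Int × List Int)) (m0 : List (Int × Int))
    (nd : (g.map Prod.fst).Nodup) {val : List (Int × Int)} {p : Int × List Int} (hp : p ∈ g)
    (hc : CohM g m0 val) (he : ExtK m0 val) :
    CohM g m0 (roundCell g val p) ∧ ExtK m0 (roundCell g val p) := by
  unfold roundCell
  by_cases hskip : (pvGetA val p.1).isSome ∨ p.2.isEmpty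
  · rw [if_pos hskip]; exact ⟨hc, he⟩
  · rw [if_neg hskip]
    push Not at hskip
    cases hs : sumSucc g val p.2 with
    | none => exact ⟨hc, he⟩
    | some t =>
      have hvp : pvGetA val p.1 = none := Option.not_isSome_iff_eq_none.1 hskip.1
      have hm0p : pvGetA m0 p.1 = none := by
        cases hm0 : pvGetA m0 p.1 with
        | none => rfl
        | some y => exact absurd hvp (he p.1 (by simp [hm0]))
      obtain ⟨F, hF⟩ := sum_to_cnt g m0 val hc he p.2 0 t hs
      have hgp : pvGetA g p.1 = some p.2 := pvGetA_of_mem_nodup nd (by cases p; exact hp)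
      have hcnt : cnt g m0 (F + 1) p.1 = some t := by
        simp only [cnt, hm0p, hgp, if_neg hskip.2, hF]
      constructor
      · intro k x hk
        by_cases hkp : k = p.1
        · subst hkp
          rw [pvGetA_set_self] at hk
          cases Option.some.inj hk
          exact ⟨F + 1, hcnt⟩
        · rw [pvGetA_set_ne val t hkp] at hk
          exact hc k x hk
      · intro k hk
        by_cases hkp : k = p.1
        · subst hkp; rw [pvGetA_set_self]; simp
        · rw [pvGetA_set_ne val t hkp]; exact he k hk

theorem foldCells_inv (g : List (Int × List Int)) (m0 : List (Int × Int))
    (nd : (g.map Prod.fst).Nodup) :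
    ∀ (l : List (Int × List Int)) (val : List (Int × Int)), (∀ q ∈ l, q ∈ g) →
      CohM g m0 val → ExtK m0 val →
      CohM g m0 (l.foldl (roundCell g) val) ∧ ExtK m0 (l.foldl (roundCell g) val) := by
  intro l
  induction l with
  | nil => intro val _ hc he; exact ⟨hc, he⟩
  | cons p r ih =>
    intro val hsub hc he
    obtain ⟨hc', he'⟩ := roundCell_inv g m0 nd (hsub p (by simp)) hc he
    exact ih (roundCell g val p) (fun q hq => hsub q (by simp [hq])) hc' he'

theorem iterate_inv (g : List (Int × List Int)) (m0 : List (Int × Int))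
    (nd : (g.map Prod.fst).Nodup) :
    ∀ (r : Nat) (val : List (Int × Int)), CohM g m0 val → ExtK m0 val →
      CohM g m0 ((roundStep g)^[r] val) ∧ ExtK m0 ((roundStep g)^[r] val) := by
  intro r
  induction r with
  | zero => intro val hc he; exact ⟨hc, he⟩
  | succ r ih =>
    intro val hc he
    rw [Function.iterate_succ_apply]
    obtain ⟨hc', he'⟩ := foldCells_inv g m0 nd g val (fun q hq => hq) hc he
    exact ih (roundStep g val) hc' he'

theorem sum_eval (g : List (Int × List Int)) (m0 val : List (Int × Int)) (F : Nat)
    (hc : CohM g m0 val) (he : ExtK m0 val) :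
    ∀ (l : List Int) (s0 t : Int), l.foldl (stepO (cnt g m0 F)) (some s0) = some t →
      (∀ x ∈ l, (pvGetA val x).isSome ∨ pvGetA g x = some []) →
      l.foldl (sumCell g val) (some s0) = some t := by
  intro l
  induction l with
  | nil => intro s0 t ht _; exact ht
  | cons x r ih =>
    intro s0 t ht hside
    cases hx : cnt g m0 F x with
    | none => simp [stepO, hx, foldO_none] at ht
    | some w =>
      simp only [List.foldl_cons, stepO, hx] at ht
      cases hvx : pvGetA val x with
      | some w' =>
        obtain ⟨fx, hfx⟩ := hc x w' hvx
        cases cnt_uniq g m0 hfx hx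
        simp only [List.foldl_cons, sumCell, hvx]
        exact ih _ _ ht (fun y hy => hside y (by simp [hy]))
      | none =>
        have hgx : pvGetA g x = some [] :=
          (hside x (by simp)).resolve_left (by simp [hvx])
        have hm0x : pvGetA m0 x = none := by
          cases hm0 : pvGetA m0 x with
          | none => rfl
          | some y => exact absurd hvx (he x (by simp [hm0]))
        have hw1 : w = 1 := by
          cases F with
          | zero => simp [cnt] at hx
          | succ F' =>
            simp [cnt, hm0x, hgx] at hx
            exact hx.symm
        subst hw1
        simp only [List.foldl_cons, sumCell, hvx, hgx, List.isEmpty_nil, if_true]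
        exact ih _ _ ht (fun y hy => hside y (by simp [hy]))

theorem fold_hits (g : List (Int × List Int)) (m0 : List (Int × Int))
    (nd : (g.map Prod.fst).Nodup) (F : Nat) (u : Int) (succ : List Int) (s : Int)
    (hm0u : pvGetA m0 u = none) (hgu : pvGetA g u = some succ) (hemp : ¬succ.isEmpty)
    (hosum : succ.foldl (stepO (cnt g m0 F)) (some 0) = some s)
    (W0 : List (Int × Int))
    (hside : ∀ x ∈ succ, (pvGetA W0 x).isSome ∨ pvGetA g x = some []) :
    ∀ (l : List (Int × List Int)) (W : List (Int × Int)), (∀ q ∈ l, q ∈ g) →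
      CohM g m0 W → ExtK m0 W → Ext2 W0 W → (u, succ) ∈ l →
      pvGetA (l.foldl (roundCell g) W) u = some s := by
  intro l
  induction l with
  | nil => intro W _ _ _ _ hmem; simp at hmem
  | cons p r ih =>
    intro W hsub hc he hext hmem
    simp only [List.foldl_cons]
    rcases List.mem_cons.1 hmem with hp | hp
    · cases hp.symm
      have hval : pvGetA (roundCell g W (u, succ)) u = some s := by
        unfold roundCell
        by_cases hskip : (pvGetA W u).isSome ∨ (u, succ).2.isEmpty
        · have hsome : (pvGetA W u).isSome := hskip.resolve_right hemp
          obtain ⟨y, hy⟩ := Option.isSome_iff_exists.1 hsome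
          obtain ⟨fy, hfy⟩ := hc u y hy
          have hcnt : cnt g m0 (F + 1) u = some s := by
            simp only [cnt, hm0u, hgu, if_neg hemp, hosum]
          cases cnt_uniq g m0 hfy hcnt
          rw [if_pos hskip]
          exact hy
        · rw [if_neg hskip]
          push Not at hskip
          have hW : sumSucc g W succ = some s := by
            unfold sumSucc
            apply sum_eval g m0 W F hc he succ 0 s hosum
            intro x hx
            rcases hside x hx with h1 | h1
            · obtain ⟨y, hy⟩ := Option.isSome_iff_exists.1 h1
              exact Or.inl (by rw [hext x y hy]; rfl)
            · exact Or.inr h1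
          simp only [hW, pvGetA_set_self]
      exact foldCells_ext2 g r (roundCell g W (u, succ)) u s hval
    · obtain ⟨hc', he'⟩ := roundCell_inv g m0 nd (hsub p (by simp)) hc he
      exact ih (roundCell g W p) (fun q hq => hsub q (by simp [hq])) hc' he'
        (ext2_trans hext (roundCell_ext2 g W p)) hp

theorem progress (g : List (Int × List Int)) (m0 : List (Int × Int))
    (nd : (g.map Prod.fst).Nodup) :
    ∀ (r : Nat) (val : List (Int × Int)), CohM g m0 val → ExtK m0 val →
      ∀ (u : Int) (succ : List Int) (s : Int), pvGetA m0 u = none →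
        pvGetA g u = some succ → ¬succ.isEmpty → cnt g m0 (r + 2) u = some s →
        pvGetA ((roundStep g)^[r + 1] val) u = some s := by
  intro r
  induction r with
  | zero =>
    intro val hc he u succ s hm0u hgu hemp hcnt
    rw [Function.iterate_one]
    have hosum : succ.foldl (stepO (cnt g m0 1)) (some 0) = some s := by
      simp only [cnt, hm0u, hgu, if_neg hemp] at hcnt
      exact hcnt
    have hside : ∀ x ∈ succ, (pvGetA val x).isSome ∨ pvGetA g x = some [] := by
      intro x hx
      obtain ⟨w, hw⟩ := foldO_forall_some _ succ 0 s hosum x hx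
      cases hvm0 : pvGetA m0 x with
      | some y =>
        exact Or.inl (Option.ne_none_iff_isSome.1 (he x (by simp [hvm0])))
      | none =>
        cases hgx : pvGetA g x with
        | none => simp [cnt, hvm0, hgx] at hw
        | some lx =>
          by_cases hlx : lx.isEmpty
          · exact Or.inr (by simp [List.isEmpty_iff.1 hlx])
          · exfalso
            simp only [cnt, hvm0, hgx, if_neg hlx] at hw
            cases lx with
            | nil => exact hlx rfl
            | cons x0 t0 => simp [List.foldl_cons, stepO, foldO_none] at hw
    exact fold_hits g m0 nd 1 u succ s hm0u hgu hemp hosum val hside g val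
      (fun q hq => hq) hc he (ext2_refl val) (pvGetA_mem hgu)
  | succ r ih =>
    intro val hc he u succ s hm0u hgu hemp hcnt
    rw [Function.iterate_succ_apply']
    obtain ⟨hcV, heV⟩ := iterate_inv g m0 nd (r + 1) val hc he
    have hosum : succ.foldl (stepO (cnt g m0 (r + 2))) (some 0) = some s := by
      simp only [cnt, hm0u, hgu, if_neg hemp] at hcnt
      exact hcnt
    have hside : ∀ x ∈ succ,
        (pvGetA ((roundStep g)^[r + 1] val) x).isSome ∨ pvGetA g x = some [] := by
      intro x hx
      obtain ⟨w, hw⟩ := foldO_forall_some _ succ 0 s hosum x hx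
      cases hvm0 : pvGetA m0 x with
      | some y =>
        exact Or.inl (Option.ne_none_iff_isSome.1 (heV x (by simp [hvm0])))
      | none =>
        cases hgx : pvGetA g x with
        | none => simp [cnt, hvm0, hgx] at hw
        | some lx =>
          by_cases hlx : lx.isEmpty
          · exact Or.inr (by simp [List.isEmpty_iff.1 hlx])
          · have := ih val hc he x lx w hvm0 hgx hlx hw
            exact Or.inl (by rw [this]; rfl)
    exact fold_hits g m0 nd (r + 2) u succ s hm0u hgu hemp hosum
      ((roundStep g)^[r + 1] val) hside g ((roundStep g)^[r + 1] val)
      (fun q hq => hq) hcV heV (ext2_refl _) (pvGetA_mem hgu)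

theorem sweep_result (g : List (Int × List Int)) (v : Int) :
    ∀ (R : Nat) (val : List (Int × Int)) (s : Int),
      pvGetA ((roundStep g)^[R] val) v = some s →
      pvGetA (sweepB g v R val) v = some s := by
  intro R
  induction R with
  | zero => intro val s h; exact h
  | succ R ih =>
    intro val s h
    simp only [sweepB]
    by_cases hv : (pvGetA val v).isSome
    · rw [if_pos hv]
      obtain ⟨y, hy⟩ := Option.isSome_iff_exists.1 hv
      have h2 := iterate_ext2 g (R + 1) val v y hy
      cases Option.some.inj (h2.symm.trans h)
      exact hy
    · rw [if_neg hv]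
      rw [Function.iterate_succ_apply] at h
      exact ih (roundStep g val) s h

-- ---------- final assembly ----------

theorem core_eq (g : List (Int × List Int)) (v : Int) (m0 : List (Int × Int))
    (nd1 : (g.map Prod.fst).Nodup)
    (hd : v ∈ m0.map Prod.fst ∨ (v, ([] : List Int)) ∈ g ∨
      (v ∈ g.map Prod.fst ∧
       (∀ p ∈ g, p.1 ∈ reachC g (m0.map Prod.fst) v → p.1 ∉ m0.map Prod.fst →
          ∀ x ∈ p.2, x ∈ g.map Prod.fst ∨ x ∈ m0.map Prod.fst) ∧
       (∀ u ∈ reachC g (m0.map Prod.fst) v, ∀ k < g.length + 2, 1 ≤ k →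
          u ∉ (stepFP g (m0.map Prod.fst))^[k] [u]))) :
    (match goA g (g.length + 2) v m0 with | some (r, _) => r | none => 0) =
    (match pvGetA m0 v with
     | some x => x
     | none =>
       match pvGetA g v with
       | none => 0
       | some succ =>
         if succ.isEmpty then 1
         else (pvGetA (sweepB g v (g.length + 1) m0) v).getD 0) := by
  cases h0 : pvGetA m0 v with
  | some x =>
    have hA : goA g (g.length + 2) v m0 = some (x, m0) := by
      show goA g (g.length + 1 + 1) v m0 = some (x, m0)
      simp [goA, h0]
    simp [hA]
  | none =>
    cases hg : pvGetA g v with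
    | none =>
      exfalso
      rcases hd with h | h | h
      · exact (pvGetA_eq_none_iff m0 v).1 h0 h
      · exact (pvGetA_eq_none_iff g v).1 hg (List.mem_map.2 ⟨(v, []), h, rfl⟩)
      · exact absurd h.1 ((pvGetA_eq_none_iff g v).1 hg)
    | some succ =>
      by_cases hemp : succ.isEmpty
      · have hA : goA g (g.length + 2) v m0 = some (1, m0) := by
          show goA g (g.length + 1 + 1) v m0 = some (1, m0)
          simp [goA, h0, hg, hemp]
        simp [hA, hemp]
      · have hd3 : v ∈ g.map Prod.fst ∧
            (∀ p ∈ g, p.1 ∈ reachC g (m0.map Prod.fst) v → p.1 ∉ m0.map Prod.fst →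
               ∀ x ∈ p.2, x ∈ g.map Prod.fst ∨ x ∈ m0.map Prod.fst) ∧
            (∀ u ∈ reachC g (m0.map Prod.fst) v, ∀ k < g.length + 2, 1 ≤ k →
               u ∉ (stepFP g (m0.map Prod.fst))^[k] [u]) := by
          rcases hd with h | h | h
          · exact absurd h ((pvGetA_eq_none_iff m0 v).1 h0)
          · rw [pvGetA_of_mem_nodup nd1 h] at hg
            cases Option.some.inj hg
            exact absurd rfl hemp
          · exact h
        obtain ⟨hv, hclosedC, hacy⟩ := hd3
        have hclosed : ∀ p ∈ g, ReachBy g (m0.map Prod.fst) v p.1 →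
            p.1 ∉ m0.map Prod.fst →
            ∀ x ∈ p.2, x ∈ g.map Prod.fst ∨ x ∈ m0.map Prod.fst :=
          fun p hp hr => hclosedC p hp (reach_shorten g (m0.map Prod.fst) v hr)
        have hbound := chain_bound g (m0.map Prod.fst) v hacy
        obtain ⟨s, hs⟩ := cnt_exists g m0 v hclosed (g.length + 2) v
          (reachBy_self g (m0.map Prod.fst) v)
          (fun c k hc0 hck => lt_of_le_of_lt (hbound c k hc0 hck) (by omega)) (Or.inl hv)
        have hcoh : CohM g m0 m0 := fun k x hk => ⟨1, by simp [cnt, hk]⟩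
        have hext : ExtK m0 m0 := fun _ hk => hk
        obtain ⟨m', hgo, _, _⟩ := goA_ok g m0 (g.length + 2) m0 v s hcoh hext hs
        have hprog := progress g m0 nd1 g.length m0 hcoh hext v succ s h0 hg hemp hs
        have hswp := sweep_result g v (g.length + 1) m0 s hprog
        simp [hgo, hemp, hswp]

-- ===== VERDICT (by name: the statement is the Claim_ definition above) =====
theorem day_10b_helper_spec : Claim_equal_day_10b_helper := by
  intro graph v map_ _ hpre
  unfold Pre_day_10b_helper at hpre
  obtain ⟨nd1, _, hd⟩ := hpre
  unfold Spec_day_10b_helper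
  cases map_ with
  | none => exact core_eq graph v [] nd1 hd
  | some m0 => exact core_eq graph v m0 nd1 hd
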